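-- pv_equiv track=rewrite | github.com/jko113/parsimonics | python/main.py | reduce_image
-- ===== SOURCE A (Python) =====
-- def combine_two_rows(top, bottom):
--     answer = []
--     row_width = len(top)
--
--     for i in range(0, row_width, 2):
--         top_left = top[i]
--         top_right = top[i + 1]
--         bottom_left = bottom[i]
--         bottom_right = bottom[i + 1]
--
--         curr_max = max(top_left, top_right, bottom_left, bottom_right)
--         answer.append(curr_max)
--     return answer
--
-- def reduce_image(input_image):
--     reduced_image = []
--
--     for i in range(0, len(input_image), 2):
--         curr_row = input_image[i]
--         next_row = input_image[i + 1]
--         new_row = combine_two_rows(curr_row, next_row)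
--         reduced_image.append(new_row)
--
--     return reduced_image
-- ===== SOURCE B (Python) =====
-- def _vertical_max(top, bottom):
--     # elementwise max of the two rows (IndexError if bottom is shorter, like A)
--     return [max(top[j], bottom[j]) for j in range(len(top))]
--
-- def _horizontal_halve(merged):
--     # reduce adjacent pairs (IndexError on odd width, like A)
--     return [max(merged[k], merged[k + 1]) for k in range(0, len(merged), 2)]
--
-- def reduce_image(input_image):
--     return [
--         _horizontal_halve(_vertical_max(input_image[i], input_image[i + 1]))
--         for i in range(0, len(input_image), 2)
--     ]
-- ===== Notes on version B (the rewrite author's own statement) =====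
-- stated objective: alternative
-- what changed: B replaces A's single 4-way max pass per row pair with a two-stage decomposition: an elementwise vertical max of the two rows followed by a horizontal pairwise reduction, exploiting max(tl,tr,bl,br)=max(max(tl,bl),max(tr,br)).
import Mathlib
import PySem

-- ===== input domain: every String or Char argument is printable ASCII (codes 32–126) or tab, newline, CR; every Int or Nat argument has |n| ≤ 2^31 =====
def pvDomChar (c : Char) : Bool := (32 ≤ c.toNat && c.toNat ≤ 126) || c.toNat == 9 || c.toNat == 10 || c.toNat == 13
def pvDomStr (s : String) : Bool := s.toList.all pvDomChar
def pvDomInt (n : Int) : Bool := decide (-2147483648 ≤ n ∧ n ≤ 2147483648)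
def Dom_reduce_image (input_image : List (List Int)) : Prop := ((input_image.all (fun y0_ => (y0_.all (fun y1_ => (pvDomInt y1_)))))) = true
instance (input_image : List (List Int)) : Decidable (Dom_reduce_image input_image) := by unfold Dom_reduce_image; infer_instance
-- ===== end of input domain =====

-- B reduces each row pair by a vertical elementwise max followed by a horizontal
-- pairwise reduction, instead of A's single 4-way max per 2x2 block (same cost).

-- ===== PORT A =====
def combine_two_rows (top bottom : List Int) : List Int :=
  (PySem.List.pyRange 0 (top.length : Int) 2).foldl (fun answer i =>
    let top_left := PySem.List.pyGetD top i 0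
    let top_right := PySem.List.pyGetD top (i + 1) 0
    let bottom_left := PySem.List.pyGetD bottom i 0
    let bottom_right := PySem.List.pyGetD bottom (i + 1) 0
    answer ++ [max (max (max top_left top_right) bottom_left) bottom_right]) []

def reduce_image (input_image : List (List Int)) : List (List Int) :=
  (PySem.List.pyRange 0 (input_image.length : Int) 2).foldl (fun reduced_image i =>
    let curr_row := PySem.List.pyGetD input_image i []
    let next_row := PySem.List.pyGetD input_image (i + 1) []
    reduced_image ++ [combine_two_rows curr_row next_row]) []

-- ===== PORT B =====
def vertical_max (top bottom : List Int) : List Int :=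
  (PySem.List.pyRange 0 (top.length : Int) 1).map (fun j =>
    max (PySem.List.pyGetD top j 0) (PySem.List.pyGetD bottom j 0))

def horizontal_halve (merged : List Int) : List Int :=
  (PySem.List.pyRange 0 (merged.length : Int) 2).map (fun k =>
    max (PySem.List.pyGetD merged k 0) (PySem.List.pyGetD merged (k + 1) 0))

def reduce_image_alt (input_image : List (List Int)) : List (List Int) :=
  (PySem.List.pyRange 0 (input_image.length : Int) 2).map (fun i =>
    horizontal_halve (vertical_max (PySem.List.pyGetD input_image i [])
                                   (PySem.List.pyGetD input_image (i + 1) [])))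

-- ===== PRECONDITION & SPEC =====
-- Pre_ excludes exactly the inputs where the Python A raises IndexError:
-- odd height, a processed top row of odd width, or a bottom row shorter than its top row.
def Pre_reduce_image (input_image : List (List Int)) : Prop :=
  input_image.length % 2 = 0 ∧
  ∀ i ∈ List.range input_image.length, i % 2 = 0 →
    (input_image.getD i []).length % 2 = 0 ∧
    (input_image.getD i []).length ≤ (input_image.getD (i + 1) []).length
instance (input_image : List (List Int)) : Decidable (Pre_reduce_image input_image) := by
  unfold Pre_reduce_image; infer_instance

def pvWitness_reduce_image : List (List Int) := [[1, 2], [3, 4]]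

def Spec_reduce_image (input_image : List (List Int)) (out : List (List Int)) : Prop := out = reduce_image_alt input_image
instance (input_image : List (List Int)) (out : List (List Int)) : Decidable (Spec_reduce_image input_image out) := by unfold Spec_reduce_image; infer_instance

-- ===== CLAIM (what is proved, stated in full; the proofs are below) =====
def Claim_equal_reduce_image : Prop := ∀ (input_image : List (List Int)), Dom_reduce_image input_image → Pre_reduce_image input_image → Spec_reduce_image input_image (reduce_image input_image)

-- ===== LEMMAS AND PROOFS =====

-- for an even-width top row, A's 4-way block max equals B's vertical-then-horizontal reduction
lemma pair_eq (top bottom : List Int) (hev : top.length % 2 = 0) :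
    combine_two_rows top bottom = horizontal_halve (vertical_max top bottom) := by
  unfold combine_two_rows horizontal_halve vertical_max
  rw [PySem.List.foldl_append_singleton_eq_map, List.nil_append]
  simp only [List.length_map, PySem.List.length_pyRange_one, Int.sub_zero, Int.toNat_natCast]
  apply List.map_congr_left
  intro i hi
  obtain ⟨h0, hlt, hdvd⟩ := (PySem.List.mem_pyRange_iff_of_pos (by norm_num) i).mp hi
  have h2 : i + 1 < (top.length : Int) := by omega
  rw [PySem.List.pyGetD_map_pyRange_of_nonneg _ _ _ _ h0 (by omega),
      PySem.List.pyGetD_map_pyRange_of_nonneg _ _ _ _ (by omega) h2]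
  rw [max_assoc, max_max_max_comm]

theorem reduce_image_spec : Claim_equal_reduce_image := by
  intro img _ hpre
  obtain ⟨_, hrows⟩ := hpre
  unfold Spec_reduce_image reduce_image reduce_image_alt
  rw [PySem.List.foldl_append_singleton_eq_map, List.nil_append]
  apply List.map_congr_left
  intro i hi
  obtain ⟨h0, hlt, hdvd⟩ := (PySem.List.mem_pyRange_iff_of_pos (by norm_num) i).mp hi
  apply pair_eq
  have hmem : i.toNat ∈ List.range img.length := by
    rw [List.mem_range]; omega
  have := (hrows i.toNat hmem (by omega)).1
  rw [PySem.List.pyGetD_eq_getElem img [] h0 (by omega)]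
  rw [List.getD_eq_getElem _ _ (by omega)] at this
  exact this
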